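-- pv_equiv track=rewrite | github.com/dejavu243/armplaces | read_tournament.py | read_names
-- ===== SOURCE A (Python) =====
-- def read_names(lines: list) -> tuple:
--     names = {}
--     results = None
--     for i, name in enumerate(lines):
--         if "+" not in name and "-" not in name:
--             names[i] = name.strip()
--         else:
--             results = list(name.strip())
--     return names, results
-- ===== SOURCE B (Python) =====
-- def read_names(lines: list) -> tuple:
--     names = {i: l.strip() for i, l in enumerate(lines) if "+" not in l and "-" not in l}
--     results = next((list(l.strip()) for l in reversed(lines) if "+" in l or "-" in l), None)
--     return names, results
-- ===== Notes on version B (the rewrite author's own statement) =====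
-- stated objective: idiomatic
-- what changed: Replaces the single stateful loop with two concern-specific passes: a dict comprehension for the names and a reverse generator search for the last '+'/'-' line.
import Mathlib
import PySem

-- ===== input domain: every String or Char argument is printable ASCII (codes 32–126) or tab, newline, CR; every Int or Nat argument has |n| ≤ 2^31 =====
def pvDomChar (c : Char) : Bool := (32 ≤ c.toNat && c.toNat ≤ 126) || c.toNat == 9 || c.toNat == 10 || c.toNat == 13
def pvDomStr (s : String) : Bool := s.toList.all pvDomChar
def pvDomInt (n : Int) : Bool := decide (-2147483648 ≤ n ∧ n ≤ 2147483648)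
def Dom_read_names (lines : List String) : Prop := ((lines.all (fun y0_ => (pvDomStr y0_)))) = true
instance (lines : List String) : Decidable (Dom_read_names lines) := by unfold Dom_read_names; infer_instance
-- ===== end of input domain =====

-- B splits A's single stateful loop into two concern-specific passes (dict comprehension + reverse search); same cost, no side effects.

-- exact port of Python list(s): the list of s's characters as one-character strings
def pyStrList (s : String) : List String := s.toList.map (fun c => String.ofList [c])

-- ===== PORT A =====
-- one loop over enumerate(lines) carrying (names dict, results option)
def read_names (lines : List String) : (List (Int × String)) × Option (List String) :=
  let st := (PySem.List.enumerate lines 0).foldl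
    (fun (st : PySem.Dict Int String × Option (List String)) (p : Int × String) =>
      if PySem.Str.isIn "+" p.2 = false ∧ PySem.Str.isIn "-" p.2 = false then
        (st.1.insert p.1 (PySem.Str.strip p.2), st.2)
      else
        (st.1, some (pyStrList (PySem.Str.strip p.2))))
    (PySem.Dict.empty, none)
  (st.1.items, st.2)

-- ===== PORT B =====
-- names: dict comprehension over enumerate(lines); results: first match of reversed(lines)
def read_names_alt (lines : List String) : (List (Int × String)) × Option (List String) :=
  let names := ((PySem.List.enumerate lines 0).filter
      (fun p => !(PySem.Str.isIn "+" p.2) && !(PySem.Str.isIn "-" p.2))).map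
      (fun p => (p.1, PySem.Str.strip p.2))
  let results := (lines.reverse.find?
      (fun l => PySem.Str.isIn "+" l || PySem.Str.isIn "-" l)).map
      (fun l => pyStrList (PySem.Str.strip l))
  (names, results)

-- ===== PRECONDITION & SPEC =====
def Spec_read_names (lines : List String) (out : (List (Int × String)) × Option (List String)) : Prop := out = read_names_alt lines
instance (lines : List String) (out : (List (Int × String)) × Option (List String)) : Decidable (Spec_read_names lines out) := by unfold Spec_read_names; infer_instance

-- ===== CLAIM (what is proved, stated in full; the proofs are below) =====
def Claim_equal_read_names : Prop := ∀ (lines : List String), Dom_read_names lines → Spec_read_names lines (read_names lines)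

-- ===== LEMMAS AND PROOFS =====

-- the loop invariant: for any start index n, dict d whose keys are all < n, and carried result r,
-- A's fold equals (d.items ++ B's names from n, B's reverse search falling back to r)
theorem read_names_loop (lines : List String) : ∀ (n : Int) (d : PySem.Dict Int String)
    (r : Option (List String)) (_ : ∀ k ∈ d.keys, k < n),
    (PySem.List.enumerate lines n).foldl
      (fun (st : PySem.Dict Int String × Option (List String)) (p : Int × String) =>
        if PySem.Str.isIn "+" p.2 = false ∧ PySem.Str.isIn "-" p.2 = false then
          (st.1.insert p.1 (PySem.Str.strip p.2), st.2)
        else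
          (st.1, some (pyStrList (PySem.Str.strip p.2))))
      (d, r)
    = ((PySem.Dict.mk (d.items ++ ((PySem.List.enumerate lines n).filter
          (fun p => !(PySem.Str.isIn "+" p.2) && !(PySem.Str.isIn "-" p.2))).map
          (fun p => (p.1, PySem.Str.strip p.2)))),
       (match lines.reverse.find? (fun l => PySem.Str.isIn "+" l || PySem.Str.isIn "-" l) with
        | some l => some (pyStrList (PySem.Str.strip l))
        | none => r)) := by
  induction lines with
  | nil => intro n d r _; simp [PySem.List.enumerate_nil]
  | cons x xs ih =>
    intro n d r hd
    rw [PySem.List.enumerate_cons]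
    simp only [List.foldl_cons]
    by_cases hx : PySem.Str.isIn "+" x = false ∧ PySem.Str.isIn "-" x = false
    · rw [if_pos hx]
      simp only [PySem.Str.isIn_eq, show "+".toList = ['+'] from rfl,
        show "-".toList = ['-'] from rfl] at hx
      have hfresh : d.contains n = false := by
        rw [PySem.Dict.contains_eq_decide_mem_keys]
        simp only [decide_eq_false_iff_not]
        intro hmem; exact absurd (hd n hmem) (lt_irrefl n)
      rw [ih (n+1) _ r (by
        intro k hk
        rw [PySem.Dict.mem_keys_insert] at hk
        rcases hk with h | h
        · omega
        · have := hd k h; omega)]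
      simp only [Prod.mk.injEq]
      refine ⟨?_, ?_⟩
      · simp [PySem.Dict.items_insert_of_not_contains d _ hfresh, hx.1, hx.2]
      · rw [List.reverse_cons, List.find?_append]
        cases xs.reverse.find? (fun l => PySem.Str.isIn "+" l || PySem.Str.isIn "-" l) with
        | some l => simp
        | none => simp [List.find?, hx.1, hx.2]
    · rw [if_neg hx]
      simp only [PySem.Str.isIn_eq, show "+".toList = ['+'] from rfl,
        show "-".toList = ['-'] from rfl] at hx
      rw [ih (n+1) d (some (pyStrList (PySem.Str.strip x))) (by intro k hk; have := hd k hk; omega)]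
      have hp : (PySem.Chars.isIn ['+'] x.toList || PySem.Chars.isIn ['-'] x.toList) = true := by
        rcases Decidable.not_and_iff_not_or_not.mp hx with h | h <;>
          simp only [Bool.not_eq_false] at h <;> simp [h]
      simp only [Prod.mk.injEq]
      refine ⟨?_, ?_⟩
      · have hc : (!(PySem.Chars.isIn ['+'] x.toList) && !(PySem.Chars.isIn ['-'] x.toList)) = false := by
          rcases Decidable.not_and_iff_not_or_not.mp hx with h | h <;>
            simp only [Bool.not_eq_false] at h <;> simp [h]
        simp [hc]
      · rw [List.reverse_cons, List.find?_append]
        cases xs.reverse.find? (fun l => PySem.Str.isIn "+" l || PySem.Str.isIn "-" l) with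
        | some l => simp
        | none => simp [List.find?, hp]

-- ===== VERDICT (by name: the statement is the Claim_ definition above) =====
theorem read_names_spec : Claim_equal_read_names := by
  intro lines _
  unfold Spec_read_names read_names read_names_alt
  rw [read_names_loop lines 0 PySem.Dict.empty none (by simp [PySem.Dict.keys_empty])]
  cases lines.reverse.find? (fun l => PySem.Str.isIn "+" l || PySem.Str.isIn "-" l) <;>
    simp [PySem.Dict.empty]
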